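-- pv_equiv track=rewrite | github.com/redthing1/binja_knife | bnk/output.py | _ordered_columns
-- ===== SOURCE A (Python) =====
-- from typing import Any, Iterable, Optional
--
-- _HEX_FIELD_PAIRS = [
--     ("address", "address_hex"),
--     ("start", "start_hex"),
--     ("end", "end_hex"),
--     ("data_offset", "data_offset_hex"),
--     ("data_end", "data_end_hex"),
-- ]
--
-- _PREFERRED_COLUMNS = [
--     "index",
--     "id",
--     "name",
--     "mode",
--     "target",
--     "busy",
--     "filename",
--     "address_hex",
--     "address",
--     "start_hex",
--     "start",
--     "end_hex",
--     "end",
--     "length_hex",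
--     "length",
--     "data_offset_hex",
--     "data_offset",
--     "data_end_hex",
--     "data_end",
--     "data_length_hex",
--     "data_length",
--     "type",
--     "arch",
--     "view_type",
--     "analysis_state",
--     "il",
--     "ref_type",
--     "function",
-- ]
--
-- def _ordered_columns(records: list[dict[str, Any]]) -> list[str]:
--     cols: list[str] = []
--     seen: set[str] = set()
--
--     for rec in records:
--         for key in rec.keys():
--             name = str(key)
--             if name in seen:
--                 continue
--             seen.add(name)
--             cols.append(name)
--
--     cols = _drop_redundant_fields(cols)
--     preferred = [col for col in _PREFERRED_COLUMNS if col in cols]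
--     rest = [col for col in cols if col not in preferred]
--     return preferred + rest
--
-- def _drop_redundant_fields(fields: list[str]) -> list[str]:
--     field_set = set(fields)
--     drop = {
--         base
--         for base, hex_field in _HEX_FIELD_PAIRS
--         if base in field_set and hex_field in field_set
--     }
--     if "idx" in field_set:
--         drop.add("idx")
--
--     if not drop:
--         return fields
--     return [field for field in fields if field not in drop]
-- ===== SOURCE B (Python) =====
-- # B: rank-table + one stable sort instead of the two-pass preferred/rest split.
-- _HEX_FIELD_PAIRS = [
--     ("address", "address_hex"),
--     ("start", "start_hex"),
--     ("end", "end_hex"),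
--     ("data_offset", "data_offset_hex"),
--     ("data_end", "data_end_hex"),
-- ]
--
-- _PREFERRED_COLUMNS = [
--     "index", "id", "name", "mode", "target", "busy", "filename",
--     "address_hex", "address", "start_hex", "start", "end_hex", "end",
--     "length_hex", "length", "data_offset_hex", "data_offset",
--     "data_end_hex", "data_end", "data_length_hex", "data_length",
--     "type", "arch", "view_type", "analysis_state", "il", "ref_type",
--     "function",
-- ]
--
-- def _ordered_columns(records):
--     cols = list(dict.fromkeys(str(key) for rec in records for key in rec.keys()))
--     present = set(cols)
--     drop = {base for base, hex_field in _HEX_FIELD_PAIRS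
--             if base in present and hex_field in present}
--     drop.add("idx")
--     cols = [c for c in cols if c not in drop]
--     rank = {name: i for i, name in enumerate(_PREFERRED_COLUMNS)}
--     sentinel = len(_PREFERRED_COLUMNS)
--     return sorted(cols, key=lambda c: rank.get(c, sentinel))
-- ===== Notes on version B (the rewrite author's own statement) =====
-- stated objective: alternative
-- what changed: B collects unique column names with one dict.fromkeys dedup and replaces the two-pass preferred/rest split by a rank table plus a single stable sort keyed by the rank (sentinel = len(_PREFERRED_COLUMNS) for non-preferred names), and always filters by the drop set instead of branching on its emptiness.
import Mathlib
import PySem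

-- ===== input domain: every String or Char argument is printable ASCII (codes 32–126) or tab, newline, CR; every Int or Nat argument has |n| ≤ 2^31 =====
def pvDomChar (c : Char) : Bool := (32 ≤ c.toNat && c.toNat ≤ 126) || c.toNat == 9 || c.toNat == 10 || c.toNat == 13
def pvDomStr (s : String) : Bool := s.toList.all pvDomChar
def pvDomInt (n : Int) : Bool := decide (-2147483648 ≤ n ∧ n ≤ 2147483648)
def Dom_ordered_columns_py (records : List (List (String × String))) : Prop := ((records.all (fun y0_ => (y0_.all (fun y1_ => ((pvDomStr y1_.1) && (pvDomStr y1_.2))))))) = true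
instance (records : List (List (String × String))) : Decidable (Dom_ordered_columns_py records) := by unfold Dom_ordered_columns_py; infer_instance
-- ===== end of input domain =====

set_option maxRecDepth 4000

-- B replaces the two-pass preferred/rest split by one stable sort under a rank table (alternative decomposition, not claimed faster).

def pvHexFieldPairs : List (String × String) :=
  [("address", "address_hex"), ("start", "start_hex"), ("end", "end_hex"),
   ("data_offset", "data_offset_hex"), ("data_end", "data_end_hex")]

def pvPreferredColumns : List String :=
  ["index", "id", "name", "mode", "target", "busy", "filename",
   "address_hex", "address", "start_hex", "start", "end_hex", "end",
   "length_hex", "length", "data_offset_hex", "data_offset",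
   "data_end_hex", "data_end", "data_length_hex", "data_length",
   "type", "arch", "view_type", "analysis_state", "il", "ref_type", "function"]

-- ===== PORT A =====
def drop_redundant_fields_py (fields : List String) : List String :=
  let fieldSet : PySem.Set String := PySem.Set.ofList fields
  let drop : PySem.Set String := pvHexFieldPairs.foldl
      (fun d p => if PySem.Set.contains fieldSet p.1 && PySem.Set.contains fieldSet p.2
                  then PySem.Set.add d p.1 else d)
      PySem.Set.empty
  let drop : PySem.Set String := if PySem.Set.contains fieldSet "idx" then PySem.Set.add drop "idx" else drop
  if drop.isEmpty then fields
  else fields.filter (fun f => !(PySem.Set.contains drop f))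

def ordered_columns_py (records : List (List (String × String))) : List String :=
  let st := records.foldl
      (fun (st : List String × PySem.Set String) rec =>
        rec.foldl
          (fun (st : List String × PySem.Set String) kv =>
            let name := kv.1
            if PySem.Set.contains st.2 name then st
            else (st.1 ++ [name], PySem.Set.add st.2 name))
          st)
      ([], PySem.Set.empty)
  let cols := drop_redundant_fields_py st.1
  let preferred := pvPreferredColumns.filter (fun col => cols.contains col)
  let rest := cols.filter (fun col => !(preferred.contains col))
  preferred ++ rest

-- ===== PORT B =====
def ordered_columns_py_alt (records : List (List (String × String))) : List String :=
  let cols := PySem.List.dedup (records.flatMap (fun rec => rec.map (fun kv => kv.1)))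
  let present : PySem.Set String := PySem.Set.ofList cols
  let drop : PySem.Set String := pvHexFieldPairs.foldl
      (fun d p => if PySem.Set.contains present p.1 && PySem.Set.contains present p.2
                  then PySem.Set.add d p.1 else d)
      PySem.Set.empty
  let drop : PySem.Set String := PySem.Set.add drop "idx"
  let cols := cols.filter (fun c => !(PySem.Set.contains drop c))
  let rank : PySem.Dict String Int :=
      (PySem.List.enumerate pvPreferredColumns 0).foldl (fun d p => d.insert p.2 p.1) PySem.Dict.empty
  let sentinel : Int := (pvPreferredColumns.length : Int)
  PySem.List.sorted cols (fun c => PySem.Dict.getD rank c sentinel) false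

-- ===== PRECONDITION & SPEC =====
def Spec_ordered_columns_py (records : List (List (String × String))) (out : List String) : Prop := out = ordered_columns_py_alt records
instance (records : List (List (String × String))) (out : List String) : Decidable (Spec_ordered_columns_py records out) := by unfold Spec_ordered_columns_py; infer_instance

-- ===== CLAIM (what is proved, stated in full; the proofs are below) =====
def Claim_equal_ordered_columns_py : Prop := ∀ (records : List (List (String × String))), Dom_ordered_columns_py records → Spec_ordered_columns_py records (ordered_columns_py records)

-- ===== LEMMAS AND PROOFS =====

def pvRankD : PySem.Dict String Int :=
  (PySem.List.enumerate pvPreferredColumns 0).foldl (fun d p => d.insert p.2 p.1) PySem.Dict.empty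

def pvKey (c : String) : Int := PySem.Dict.getD pvRankD c 28

theorem pvKey_lt_of_pref : ∀ c ∈ pvPreferredColumns, pvKey c < 28 := by decide

theorem pref_pairwise : pvPreferredColumns.Pairwise (fun a b => pvKey a < pvKey b) := by decide

theorem rank_keys_pref : ∀ p ∈ pvRankD.items, p.1 ∈ pvPreferredColumns := by decide

theorem getD_of_forall_ne {κ ν : Type} [BEq κ] [LawfulBEq κ] (d : PySem.Dict κ ν) (c : κ) (v : ν)
    (h : ∀ p ∈ d.items, p.1 ≠ c) : PySem.Dict.getD d c v = v := by
  have : List.find? (fun p => p.1 == c) d.items = none := by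
    rw [List.find?_eq_none]
    intro p hp
    simpa using h p hp
  simp [PySem.Dict.getD, PySem.Dict.get?, this]

theorem pvKey_of_not_pref (c : String) (h : c ∉ pvPreferredColumns) : pvKey c = 28 := by
  apply getD_of_forall_ne
  intro p hp he
  exact h (he ▸ rank_keys_pref p hp)

theorem insertBy_front {α : Type} (before : α → α → Bool) (x : α) (ys : List α)
    (h : ∀ y ∈ ys, before x y = true) : PySem.List.insertBy before x ys = x :: ys := by
  cases ys with
  | nil => simp [PySem.List.insertBy]
  | cons y ys => simp [PySem.List.insertBy, h y (by simp)]

theorem insertBy_cons_of_not {α : Type} (before : α → α → Bool) (x y : α) (ys : List α)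
    (h : before x y = false) :
    PySem.List.insertBy before x (y :: ys) = y :: PySem.List.insertBy before x ys := by
  simp [PySem.List.insertBy, h]

-- inserting a preferred name x into (pref.filter (· ∈ l)) ++ rest
theorem ins_lemma (x : String) (l : List String) (hxl : x ∉ l) (rest : List String)
    (hrest : ∀ y ∈ rest, pvKey x < pvKey y) :
    ∀ (pref : List String), pref.Pairwise (fun a b => pvKey a < pvKey b) → x ∈ pref →
    PySem.List.insertBy (fun a b => decide (pvKey a < pvKey b)) x
        (pref.filter (fun p => l.contains p) ++ rest)
      = pref.filter (fun p => l.contains p || p == x) ++ rest := by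
  intro pref
  induction pref with
  | nil => intro _ hx; exact absurd hx (by simp)
  | cons p pref ih =>
    intro hpw hx
    have hpw' := (List.pairwise_cons.mp hpw).2
    have hhead := (List.pairwise_cons.mp hpw).1
    by_cases hpl : l.contains p
    · -- p stays; p ≠ x since x ∉ l
      have hpx : p ≠ x := fun he => hxl (by simpa [he] using (List.contains_iff_mem.mp hpl))
      have hxp : x ∈ pref := (List.mem_cons.mp hx).resolve_left (fun he => hpx he.symm)
      have hkey : pvKey p < pvKey x := hhead x hxp
      rw [List.filter_cons_of_pos (by simpa using hpl), List.cons_append,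
          insertBy_cons_of_not _ _ _ _ (by simp; omega),
          ih hpw' hxp,
          List.filter_cons_of_pos (by simp [List.contains_iff_mem.mp hpl]), List.cons_append]
    · by_cases hpx : p = x
      · subst hpx
        have hne : ∀ q ∈ pref, q ≠ p := fun q hq he => by
          have := hhead q hq; simp [he] at this
        rw [List.filter_cons_of_neg (by simpa using hpl),
            List.filter_cons_of_pos (by simp),
            insertBy_front]
        · rw [List.cons_append]
          congr 2
          apply List.filter_congr
          intro q hq
          simp [hne q hq, beq_iff_eq]
        · intro y hy
          simp only [List.mem_append] at hy
          rcases hy with hy | hy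
          · have := hhead y (List.mem_of_mem_filter hy); simpa using this
          · simpa using hrest y hy
      · have hxp : x ∈ pref := (List.mem_cons.mp hx).resolve_left (fun he => hpx he.symm)
        rw [List.filter_cons_of_neg (by simpa using hpl),
            List.filter_cons_of_neg (by simp [hpx]; simpa using hpl),
            ih hpw' hxp]

theorem sort_eq (xs : List String) (hnd : xs.Nodup) :
    PySem.List.sorted xs pvKey false
      = pvPreferredColumns.filter (fun p => xs.contains p)
        ++ xs.filter (fun c => !(pvPreferredColumns.contains c)) := by
  rw [PySem.List.sorted_eq_foldl_insertBy]
  induction xs using List.reverseRecOn with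
  | nil => simp
  | append_singleton l x ih =>
    have hnd' : l.Nodup := hnd.sublist (by simp)
    have hxl : x ∉ l := by
      have h := List.nodup_append.mp hnd
      intro hm
      exact h.2.2 x hm x (by simp) rfl
    rw [List.foldl_append, List.foldl_cons, List.foldl_nil, ih hnd']
    by_cases hx : x ∈ pvPreferredColumns
    · rw [ins_lemma x l hxl _ ?_ pvPreferredColumns pref_pairwise hx]
      · have h1 : pvPreferredColumns.filter (fun p => l.contains p || p == x)
            = pvPreferredColumns.filter (fun p => (l ++ [x]).contains p) := by
          apply List.filter_congr
          intro q _
          by_cases h : q = x <;> simp [h]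
        have h2 : (l ++ [x]).filter (fun c => !(pvPreferredColumns.contains c))
            = l.filter (fun c => !(pvPreferredColumns.contains c)) := by
          rw [List.filter_append]
          simp [List.contains_iff_mem, hx]
        rw [h1, h2]
      · intro y hy
        have hynp : y ∉ pvPreferredColumns := by
          have := List.of_mem_filter hy
          simpa [List.contains_iff_mem] using this
        rw [pvKey_of_not_pref y hynp]
        exact pvKey_lt_of_pref x hx
    · rw [PySem.List.insertBy_of_forall_not_before]
      · have h1 : pvPreferredColumns.filter (fun p => (l ++ [x]).contains p)
            = pvPreferredColumns.filter (fun p => l.contains p) := by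
          apply List.filter_congr
          intro q hq
          have : q ≠ x := fun he => hx (he ▸ hq)
          simp [List.contains_iff_mem, this]
        have h2 : (l ++ [x]).filter (fun c => !(pvPreferredColumns.contains c))
            = l.filter (fun c => !(pvPreferredColumns.contains c)) ++ [x] := by
          rw [List.filter_append]
          simp [List.contains_iff_mem, hx]
        rw [h1, h2, List.append_assoc]
      · intro y hy
        have hkx : pvKey x = 28 := pvKey_of_not_pref x hx
        simp only [List.mem_append] at hy
        rcases hy with hy | hy
        · have : pvKey y < 28 := pvKey_lt_of_pref y (List.mem_of_mem_filter hy)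
          simp [hkx]; omega
        · have hynp : y ∉ pvPreferredColumns := by
            have := List.of_mem_filter hy
            simpa [List.contains_iff_mem] using this
          simp [hkx, pvKey_of_not_pref y hynp]

theorem step_pair (l : List String) :
    ∀ (s : List String),
    l.foldl (fun (st : List String × PySem.Set String) k =>
        if PySem.Set.contains st.2 k then st else (st.1 ++ [k], PySem.Set.add st.2 k)) (s, s)
      = (l.foldl PySem.Set.add s, l.foldl PySem.Set.add s) := by
  induction l with
  | nil => intro s; rfl
  | cons k l ih =>
    intro s
    simp only [List.foldl_cons]
    by_cases h : PySem.Set.contains s k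
    · have ha : PySem.Set.add s k = s := by
        simp only [PySem.Set.add, h, if_pos]
      rw [if_pos h, ha, ih s]
    · have ha : PySem.Set.add s k = s ++ [k] := by
        simp only [PySem.Set.add, h, if_neg, Bool.false_eq_true, reduceIte]
      rw [if_neg h, ha, ih (s ++ [k])]

def pvHexDrop (fields : List String) : PySem.Set String :=
  pvHexFieldPairs.foldl
    (fun d p => if PySem.Set.contains (PySem.Set.ofList fields) p.1 && PySem.Set.contains (PySem.Set.ofList fields) p.2
                then PySem.Set.add d p.1 else d)
    PySem.Set.empty

theorem drop_eq (fields : List String) :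
    drop_redundant_fields_py fields
      = fields.filter (fun c => !(PySem.Set.contains (PySem.Set.add (pvHexDrop fields) "idx") c)) := by
  have hd : (List.foldl (fun d p => if PySem.Set.contains (PySem.Set.ofList fields) p.1 && PySem.Set.contains (PySem.Set.ofList fields) p.2 then PySem.Set.add d p.1 else d) PySem.Set.empty pvHexFieldPairs) = pvHexDrop fields := rfl
  unfold drop_redundant_fields_py
  simp only [hd]
  by_cases hidx : PySem.Set.contains (PySem.Set.ofList fields) "idx"
  · rw [if_pos hidx]
    have hne : ((PySem.Set.add (pvHexDrop fields) "idx") : List String) ≠ [] := by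
      intro he
      have : "idx" ∈ PySem.Set.add (pvHexDrop fields) "idx" :=
        (PySem.Set.mem_add _ _ _).mpr (Or.inr rfl)
      rw [he] at this; simp at this
    rw [if_neg (by simp only [List.isEmpty_iff]; exact hne)]
  · have hnidx : "idx" ∉ fields := by
      intro hm
      exact hidx (by simp [List.contains_iff_mem, PySem.Set.mem_ofList, hm, PySem.Set.contains])
    rw [if_neg hidx]
    have hcongr : ∀ c ∈ fields,
        (!(PySem.Set.contains (pvHexDrop fields) c)) = (!(PySem.Set.contains (PySem.Set.add (pvHexDrop fields) "idx") c)) := by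
      intro c hc
      have hcx : c ≠ "idx" := fun he => hnidx (he ▸ hc)
      simp only [PySem.Set.contains, List.contains_iff_mem]
      by_cases hmem : c ∈ (pvHexDrop fields : List String)
      · simp [hmem, (PySem.Set.mem_add _ _ _).mpr (Or.inl hmem)]
      · have hni : c ∉ PySem.Set.add (pvHexDrop fields) "idx" := by
          intro h; rcases (PySem.Set.mem_add _ _ _).mp h with h | h
          · exact hmem h
          · exact hcx h
        simp [hmem, hni]
    by_cases hemp : (pvHexDrop fields : List String).isEmpty
    · rw [if_pos hemp]
      symm
      apply List.filter_eq_self.mpr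
      intro c hc
      rw [← hcongr c hc]
      have hni : c ∉ (pvHexDrop fields : List String) := by
        rw [List.isEmpty_iff] at hemp; rw [hemp]; simp
      simp [PySem.Set.contains, List.contains_iff_mem, hni]
    · rw [if_neg hemp]
      exact List.filter_congr hcongr

theorem main_eq (records : List (List (String × String))) :
    ordered_columns_py records = ordered_columns_py_alt records := by
  unfold ordered_columns_py ordered_columns_py_alt
  have hsent : (pvPreferredColumns.length : Int) = 28 := rfl
  have hrank : (PySem.List.enumerate pvPreferredColumns 0).foldl (fun d p => d.insert p.2 p.1) PySem.Dict.empty = pvRankD := rfl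
  simp only [hsent, hrank]
  -- Stage 1: the cols/seen loop computes the ordered dedup of all keys
  set keys := records.flatMap (fun rec => rec.map (fun kv => kv.1)) with hkeys
  have h1 : (records.foldl
      (fun (st : List String × PySem.Set String) rec =>
        rec.foldl
          (fun (st : List String × PySem.Set String) kv =>
            if PySem.Set.contains st.2 kv.1 then st
            else (st.1 ++ [kv.1], PySem.Set.add st.2 kv.1))
          st)
      ([], PySem.Set.empty)).1 = PySem.List.dedup keys := by
    have hflat : (records.foldl
        (fun (st : List String × PySem.Set String) rec =>
          rec.foldl
            (fun (st : List String × PySem.Set String) kv =>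
              if PySem.Set.contains st.2 kv.1 then st
              else (st.1 ++ [kv.1], PySem.Set.add st.2 kv.1))
            st)
        ([], PySem.Set.empty))
        = keys.foldl
            (fun (st : List String × PySem.Set String) k =>
              if PySem.Set.contains st.2 k then st
              else (st.1 ++ [k], PySem.Set.add st.2 k))
            ([], PySem.Set.empty) := by
      rw [hkeys, List.foldl_flatMap]
      simp only [List.foldl_map]
    rw [hflat]
    have := step_pair keys []
    simp only [PySem.Set.empty] at this ⊢
    rw [this]
    simp [PySem.List.dedup, PySem.Set.ofList, PySem.Set.empty]
  rw [h1, drop_eq]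
  -- Stage 2/3
  set C := PySem.List.dedup keys with hC
  have hd2 : (pvHexFieldPairs.foldl (fun d p => if PySem.Set.contains (PySem.Set.ofList C) p.1 && PySem.Set.contains (PySem.Set.ofList C) p.2 then PySem.Set.add d p.1 else d) PySem.Set.empty) = pvHexDrop C := rfl
  have hkeyf : (fun c => PySem.Dict.getD pvRankD c 28) = pvKey := rfl
  simp only [hd2, hkeyf]
  set F := C.filter (fun c => !(PySem.Set.contains (PySem.Set.add (pvHexDrop C) "idx") c)) with hF
  have hnd : F.Nodup := by
    apply List.Nodup.filter
    rw [hC, PySem.List.dedup_eq_ofList]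
    exact PySem.Set.nodup_ofList keys
  have hrest : F.filter (fun col => !((pvPreferredColumns.filter (fun col => F.contains col)).contains col))
      = F.filter (fun c => !(pvPreferredColumns.contains c)) := by
    apply List.filter_congr
    intro c hc
    by_cases hp : c ∈ pvPreferredColumns
    · simp [List.contains_iff_mem, hp, List.mem_filter, hc]
    · simp [List.contains_iff_mem, hp, List.mem_filter]
  rw [hrest, sort_eq F hnd]

-- ===== VERDICT (by name: the statement is the Claim_ definition above) =====
theorem ordered_columns_py_spec : Claim_equal_ordered_columns_py := by
  intro records _
  unfold Spec_ordered_columns_py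
  exact main_eq records
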